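-- pv_equiv track=rewrite | github.com/MaximillianPurnomo/bootcamp | BootcampOddEvenPair.py | findEven
-- ===== SOURCE A (Python) =====
-- def findEven(lst):
--     evenProduct = []
--
--     for firstNum in range(len(lst) - 1):
--         for secondNum in range(firstNum + 1, len(lst)):
--             num = lst[firstNum] * lst[secondNum]
--             if num % 2 == 0 and num not in evenProduct:
--                 evenProduct.append(num)
--
--     return sorted(evenProduct)
-- ===== SOURCE B (Python) =====
-- def findEven(lst):
--     evens = [x for x in lst if x % 2 == 0]
--     odds = [x for x in lst if x % 2 != 0]
--     prods = {e1 * e2 for k, e1 in enumerate(evens) for e2 in evens[k + 1:]}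
--     prods.update(e * o for e in evens for o in odds)
--     return sorted(prods)
-- ===== Notes on version B (the rewrite author's own statement) =====
-- stated objective: faster
-- what changed: Partitions the values into evens and odds, builds a hash set of even*even (unordered pairs) and even*odd products instead of scanning all index pairs with a linear 'not in' membership test on a growing list.
import Mathlib
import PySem

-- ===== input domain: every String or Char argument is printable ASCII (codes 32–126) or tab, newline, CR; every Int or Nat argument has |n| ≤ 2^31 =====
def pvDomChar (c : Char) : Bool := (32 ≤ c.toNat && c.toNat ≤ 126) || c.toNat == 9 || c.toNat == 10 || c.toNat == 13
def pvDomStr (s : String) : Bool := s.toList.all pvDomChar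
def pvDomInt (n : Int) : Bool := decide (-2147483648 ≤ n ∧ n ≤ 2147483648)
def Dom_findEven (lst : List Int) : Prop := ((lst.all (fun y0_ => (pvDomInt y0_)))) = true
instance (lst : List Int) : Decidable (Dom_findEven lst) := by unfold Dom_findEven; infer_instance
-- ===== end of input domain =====

-- B partitions the values into evens and odds and collects the even*even and even*odd products in a set,
-- instead of A's scan over all index pairs with a linear 'not in' dedup test; return values proved equal.


-- ===== PORT A =====
def findEven (lst : List Int) : List Int :=
  let evenProduct :=
    (PySem.List.pyRange 0 ((lst.length : Int) - 1) 1).foldl (fun acc i =>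
      (PySem.List.pyRange (i + 1) (lst.length : Int) 1).foldl (fun acc2 j =>
        let num := PySem.List.pyGetD lst i 0 * PySem.List.pyGetD lst j 0
        if PySem.Int.mod num 2 = 0 ∧ num ∉ acc2 then acc2 ++ [num] else acc2) acc) []
  PySem.List.sorted evenProduct (fun x => x) false

-- ===== PORT B =====
def findEven_alt (lst : List Int) : List Int :=
  let evens := lst.filter (fun x => PySem.Int.mod x 2 == 0)
  let odds := lst.filter (fun x => PySem.Int.mod x 2 != 0)
  -- evens[k+1:] with k ≥ 0 is drop (k+1)  (PySem.List.slice_from)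
  let prods := PySem.Set.ofList ((PySem.List.enumerate evens 0).flatMap
      (fun p => (evens.drop (p.1 + 1).toNat).map (fun e2 => p.2 * e2)))
  let prods := PySem.Set.update prods (evens.flatMap (fun e => odds.map (fun o => e * o)))
  PySem.List.sorted prods (fun x => x) false

-- ===== PRECONDITION & SPEC =====
def Spec_findEven (lst : List Int) (out : List Int) : Prop := out = findEven_alt lst
instance (lst : List Int) (out : List Int) : Decidable (Spec_findEven lst out) := by unfold Spec_findEven; infer_instance

-- ===== CLAIM (what is proved, stated in full; the proofs are below) =====
def Claim_equal_findEven : Prop := ∀ (lst : List Int), Dom_findEven lst → Spec_findEven lst (findEven lst)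

-- ===== LEMMAS AND PROOFS =====

-- v is the product of two entries of xs taken at increasing positions …
def idxPair (xs : List Int) (v : Int) : Prop :=
  ∃ i j : Nat, i < j ∧ ∃ a b, xs[i]? = some a ∧ xs[j]? = some b ∧ a * b = v

-- … equivalently, of a 2-element sublist of xs
def pairSub (xs : List Int) (v : Int) : Prop := ∃ a b, a * b = v ∧ [a, b].Sublist xs

theorem pair_sublist_of_getElem {xs : List Int} {i j : Nat} {a b : Int}
    (hij : i < j) (ha : xs[i]? = some a) (hb : xs[j]? = some b) : [a, b].Sublist xs := by
  rw [List.getElem?_eq_some_iff] at ha hb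
  obtain ⟨hi, ha⟩ := ha; obtain ⟨hj, hb⟩ := hb
  have h1 : [a].Sublist (xs.take (i+1)) := by
    rw [List.singleton_sublist]
    have h : (xs.take (i+1))[i]'(by simp [List.length_take]; omega) = a := by
      rw [List.getElem_take]; exact ha
    rw [← h]; exact List.getElem_mem _
  have h2 : [b].Sublist (xs.drop (i+1)) := by
    rw [List.singleton_sublist]
    have hk : i + 1 + (j - (i+1)) = j := by omega
    have h : (xs.drop (i+1))[j - (i+1)]'(by simp [List.length_drop]; omega) = b := by
      rw [List.getElem_drop]; simp_rw [hk]; exact hb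
    rw [← h]; exact List.getElem_mem _
  have h3 := List.Sublist.append h1 h2
  rwa [List.take_append_drop] at h3

theorem sublist_pair_exists {xs : List Int} {a b : Int} (h : [a, b].Sublist xs) :
    ∃ i j : Nat, i < j ∧ xs[i]? = some a ∧ xs[j]? = some b := by
  induction xs with
  | nil => simp at h
  | cons x t ih =>
    cases h with
    | cons _ h1 =>
      obtain ⟨i, j, hij, ha, hb⟩ := ih h1
      exact ⟨i+1, j+1, by omega, by simpa using ha, by simpa using hb⟩
    | cons₂ _ h2 =>
      obtain ⟨j, hj⟩ := List.getElem?_of_mem (List.singleton_sublist.mp h2)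
      exact ⟨0, j+1, by omega, by simp, by simpa using hj⟩

theorem idxPair_iff_pairSub (xs : List Int) (v : Int) : idxPair xs v ↔ pairSub xs v := by
  constructor
  · rintro ⟨i, j, hij, a, b, ha, hb, hab⟩
    exact ⟨a, b, hab, pair_sublist_of_getElem hij ha hb⟩
  · rintro ⟨a, b, hab, hsub⟩
    obtain ⟨i, j, hij, ha, hb⟩ := sublist_pair_exists hsub
    exact ⟨i, j, hij, a, b, ha, hb, hab⟩

theorem pair_sublist_of_mem_ne {xs : List Int} {x y : Int} (hx : x ∈ xs) (hy : y ∈ xs)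
    (hne : x ≠ y) : [x, y].Sublist xs ∨ [y, x].Sublist xs := by
  induction xs with
  | nil => simp at hx
  | cons h t ih =>
    rcases eq_or_ne x h with rfl | hxh
    · left
      have : y ∈ t := by rcases List.mem_cons.mp hy with rfl | h' ; exact absurd rfl hne; exact h'
      exact List.cons_sublist_cons.mpr (List.singleton_sublist.mpr this)
    · rcases eq_or_ne y h with rfl | hyh
      · right
        have : x ∈ t := by rcases List.mem_cons.mp hx with rfl | h' ; exact absurd rfl hxh; exact h'
        exact List.cons_sublist_cons.mpr (List.singleton_sublist.mpr this)
      · have hx' : x ∈ t := by rcases List.mem_cons.mp hx with rfl | h' ; exact absurd rfl hxh; exact h'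
        have hy' : y ∈ t := by rcases List.mem_cons.mp hy with rfl | h' ; exact absurd rfl hyh; exact h'
        rcases ih hx' hy' with h1 | h1
        · exact Or.inl (h1.cons h)
        · exact Or.inr (h1.cons h)

theorem evenB_iff (x : Int) : ((PySem.Int.mod x 2 == 0) = true) ↔ (2 : Int) ∣ x := by
  simp

theorem filter_pair_self {a b : Int} (ha : (2:Int) ∣ a) (hb : (2:Int) ∣ b) :
    [a, b].filter (fun x => PySem.Int.mod x 2 == 0) = [a, b] := by
  simp [List.filter, Int.emod_eq_zero_of_dvd, ha, hb]

-- the parity split: an even product of a 2-sublist of lst is a product of a 2-sublist of the evens,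
-- or the product of an even and an odd entry
theorem parity_split (lst : List Int) (v : Int) (hv : (2 : Int) ∣ v) :
    pairSub lst v ↔
      pairSub (lst.filter (fun x => PySem.Int.mod x 2 == 0)) v ∨
      ∃ e ∈ lst.filter (fun x => PySem.Int.mod x 2 == 0),
        ∃ o ∈ lst.filter (fun x => PySem.Int.mod x 2 != 0), e * o = v := by
  constructor
  · rintro ⟨a, b, hab, hsub⟩
    have hdvd : (2:Int) ∣ a * b := hab ▸ hv
    rcases (Int.prime_two.2.2 a b hdvd) with ha | hb
    · by_cases hb2 : (2:Int) ∣ b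
      · left
        refine ⟨a, b, hab, ?_⟩
        have hf := hsub.filter (fun x => PySem.Int.mod x 2 == 0)
        rwa [filter_pair_self ha hb2] at hf
      · right
        refine ⟨a, ?_, b, ?_, hab⟩
        · exact List.mem_filter.mpr ⟨hsub.subset (by simp), (evenB_iff a).mpr ha⟩
        · refine List.mem_filter.mpr ⟨hsub.subset (by simp), ?_⟩
          simpa [evenB_iff] using hb2
    · by_cases ha2 : (2:Int) ∣ a
      · left
        refine ⟨a, b, hab, ?_⟩
        have hf := hsub.filter (fun x => PySem.Int.mod x 2 == 0)
        rwa [filter_pair_self ha2 hb] at hf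
      · right
        refine ⟨b, ?_, a, ?_, by rw [mul_comm]; exact hab⟩
        · exact List.mem_filter.mpr ⟨hsub.subset (by simp), (evenB_iff b).mpr hb⟩
        · refine List.mem_filter.mpr ⟨hsub.subset (by simp), ?_⟩
          simpa [evenB_iff] using ha2
  · rintro (⟨a, b, hab, hsub⟩ | ⟨e, he, o, ho, heo⟩)
    · exact ⟨a, b, hab, hsub.trans List.filter_sublist⟩
    · obtain ⟨heL, he2⟩ := List.mem_filter.mp he
      obtain ⟨hoL, ho2⟩ := List.mem_filter.mp ho
      rw [evenB_iff] at he2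
      have ho2' : ¬ (2:Int) ∣ o := by simpa [evenB_iff] using ho2
      have hne : e ≠ o := fun h => ho2' (h ▸ he2)
      rcases pair_sublist_of_mem_ne heL hoL hne with h | h
      · exact ⟨e, o, heo, h⟩
      · exact ⟨o, e, by rw [mul_comm]; exact heo, h⟩

theorem mem_S_iff (lst : List Int) (v : Int) :
    v ∈ (PySem.List.pyRange 0 ((lst.length : Int) - 1) 1).flatMap
        (fun i => (PySem.List.pyRange (i + 1) (lst.length : Int) 1).map
          (fun j => PySem.List.pyGetD lst i 0 * PySem.List.pyGetD lst j 0)) ↔ idxPair lst v := by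
  rw [List.mem_flatMap]
  constructor
  · rintro ⟨i, hi, hv⟩
    rw [PySem.List.mem_pyRange_one] at hi
    rw [List.mem_map] at hv
    obtain ⟨j, hj, hfv⟩ := hv
    rw [PySem.List.mem_pyRange_one] at hj
    rw [PySem.List.pyGetD_eq_getElem lst 0 (by omega) (by omega),
        PySem.List.pyGetD_eq_getElem lst 0 (by omega) (by omega)] at hfv
    exact ⟨i.toNat, j.toNat, by omega, lst[i.toNat], lst[j.toNat],
      List.getElem?_eq_getElem (by omega), List.getElem?_eq_getElem (by omega), hfv⟩
  · rintro ⟨i, j, hij, a, b, ha, hb, hab⟩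
    rw [List.getElem?_eq_some_iff] at ha hb
    obtain ⟨hi, rfl⟩ := ha; obtain ⟨hj, rfl⟩ := hb
    refine ⟨(i : Int), ?_, ?_⟩
    · rw [PySem.List.mem_pyRange_one]; omega
    · rw [List.mem_map]
      refine ⟨(j : Int), ?_, ?_⟩
      · rw [PySem.List.mem_pyRange_one]; omega
      · rw [PySem.List.pyGetD_eq_getElem lst 0 (by omega) (by exact_mod_cast hi),
            PySem.List.pyGetD_eq_getElem lst 0 (by omega) (by exact_mod_cast hj)]
        simpa using hab

theorem mem_ee_iff (evens : List Int) (v : Int) :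
    v ∈ (PySem.List.enumerate evens 0).flatMap
        (fun p => (evens.drop (p.1 + 1).toNat).map (fun e2 => p.2 * e2)) ↔ idxPair evens v := by
  rw [List.mem_flatMap]
  constructor
  · rintro ⟨p, hp, hv⟩
    rw [PySem.List.mem_enumerate_iff] at hp
    obtain ⟨k, hk, rfl⟩ := hp
    rw [List.mem_map] at hv
    obtain ⟨e2, he2, hfv⟩ := hv
    have hdrop : (((0:Int) + (k:Int)) + 1).toNat = k + 1 := by omega
    rw [hdrop] at he2
    obtain ⟨m, hm, rfl⟩ := List.mem_iff_getElem.mp he2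
    rw [List.getElem_drop] at hfv
    have hlen : k + 1 + m < evens.length := by simp [List.length_drop] at hm; omega
    exact ⟨k, k + 1 + m, by omega, evens[k], evens[k + 1 + m],
      List.getElem?_eq_getElem hk, List.getElem?_eq_getElem hlen, hfv⟩
  · rintro ⟨i, j, hij, a, b, ha, hb, hab⟩
    rw [List.getElem?_eq_some_iff] at ha hb
    obtain ⟨hi, rfl⟩ := ha; obtain ⟨hj, rfl⟩ := hb
    refine ⟨((0 : Int) + (i : Int), evens[i]), ?_, ?_⟩
    · rw [PySem.List.mem_enumerate_iff]
      exact ⟨i, hi, rfl⟩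
    · rw [List.mem_map]
      refine ⟨evens[j], ?_, hab⟩
      have h1 : (((0:Int) + (i:Int)) + 1).toNat = i + 1 := by omega
      rw [h1, List.mem_iff_getElem]
      exact ⟨j - (i+1), by simp [List.length_drop]; omega,
        by rw [List.getElem_drop]; congr 1; omega⟩

-- A's nested index loop with its 'not in' test is Set.ofList of the even-filtered product stream
theorem findEven_loop_eq (lst : List Int) :
    (PySem.List.pyRange 0 ((lst.length : Int) - 1) 1).foldl (fun acc i =>
      (PySem.List.pyRange (i + 1) (lst.length : Int) 1).foldl (fun acc2 j =>
        let num := PySem.List.pyGetD lst i 0 * PySem.List.pyGetD lst j 0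
        if PySem.Int.mod num 2 = 0 ∧ num ∉ acc2 then acc2 ++ [num] else acc2) acc) []
    = PySem.Set.ofList
        (((PySem.List.pyRange 0 ((lst.length : Int) - 1) 1).flatMap
          (fun i => (PySem.List.pyRange (i + 1) (lst.length : Int) 1).map
            (fun j => PySem.List.pyGetD lst i 0 * PySem.List.pyGetD lst j 0))).filter
          (fun x => decide (PySem.Int.mod x 2 = 0))) := by
  have hstep : ∀ (acc2 : List Int) (num : Int),
      (if PySem.Int.mod num 2 = 0 ∧ num ∉ acc2 then acc2 ++ [num] else acc2)
      = (if PySem.Int.mod num 2 = 0 then PySem.Set.add acc2 num else acc2) := by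
    intro acc2 num
    by_cases h1 : (2:Int) ∣ num <;> by_cases h2 : num ∈ acc2 <;>
      simp [PySem.Int.mod_eq_zero_iff_dvd, h1, h2, PySem.Set.add]
  have hinner : ∀ (acc : List Int) (i : Int),
      (PySem.List.pyRange (i + 1) (lst.length : Int) 1).foldl (fun acc2 j =>
        let num := PySem.List.pyGetD lst i 0 * PySem.List.pyGetD lst j 0
        if PySem.Int.mod num 2 = 0 ∧ num ∉ acc2 then acc2 ++ [num] else acc2) acc
      = ((PySem.List.pyRange (i + 1) (lst.length : Int) 1).map
          (fun j => PySem.List.pyGetD lst i 0 * PySem.List.pyGetD lst j 0)).foldl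
          (fun acc2 num => if PySem.Int.mod num 2 = 0 ∧ num ∉ acc2 then acc2 ++ [num] else acc2) acc := by
    intro acc i
    rw [List.foldl_map]
  calc
    _ = (PySem.List.pyRange 0 ((lst.length : Int) - 1) 1).foldl (fun acc i =>
          ((PySem.List.pyRange (i + 1) (lst.length : Int) 1).map
            (fun j => PySem.List.pyGetD lst i 0 * PySem.List.pyGetD lst j 0)).foldl
            (fun acc2 num => if PySem.Int.mod num 2 = 0 ∧ num ∉ acc2 then acc2 ++ [num] else acc2) acc) [] := by
        exact PySem.List.foldl_congr_mem _ _ _ _ (fun acc i _ => hinner acc i)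
    _ = (((PySem.List.pyRange 0 ((lst.length : Int) - 1) 1).map
          (fun i => (PySem.List.pyRange (i + 1) (lst.length : Int) 1).map
            (fun j => PySem.List.pyGetD lst i 0 * PySem.List.pyGetD lst j 0))).flatten).foldl
          (fun acc2 num => if PySem.Int.mod num 2 = 0 ∧ num ∉ acc2 then acc2 ++ [num] else acc2) [] := by
        rw [List.foldl_flatten, List.foldl_map]
    _ = (((PySem.List.pyRange 0 ((lst.length : Int) - 1) 1).flatMap
          (fun i => (PySem.List.pyRange (i + 1) (lst.length : Int) 1).map
            (fun j => PySem.List.pyGetD lst i 0 * PySem.List.pyGetD lst j 0)))).foldl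
          (fun acc2 num => if PySem.Int.mod num 2 = 0 ∧ num ∉ acc2 then acc2 ++ [num] else acc2) [] := by
        rw [List.flatMap_def]
    _ = _ := by
        rw [PySem.List.foldl_congr_mem _ _ _ _ (fun acc x _ => hstep acc x),
            PySem.List.foldl_ite_eq_foldl_filter, PySem.Set.ofList_eq_foldl]

-- every value either port collects is even
theorem pairSub_evens_dvd {lst : List Int} {v : Int}
    (h : pairSub (lst.filter (fun x => PySem.Int.mod x 2 == 0)) v) : (2:Int) ∣ v := by
  obtain ⟨a, b, hab, hsub⟩ := h
  have ha : a ∈ lst.filter (fun x => PySem.Int.mod x 2 == 0) := hsub.subset (by simp)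
  have := (evenB_iff a).mp (List.mem_filter.mp ha).2
  exact hab ▸ this.mul_right b

-- ===== VERDICT (by name: the statement is the Claim_ definition above) =====
theorem findEven_spec : Claim_equal_findEven := by
  intro lst _
  unfold Spec_findEven findEven findEven_alt
  simp only []
  rw [findEven_loop_eq]
  rw [show PySem.Set.update
        (PySem.Set.ofList ((PySem.List.enumerate (lst.filter (fun x => PySem.Int.mod x 2 == 0)) 0).flatMap
          (fun p => ((lst.filter (fun x => PySem.Int.mod x 2 == 0)).drop (p.1 + 1).toNat).map (fun e2 => p.2 * e2))))
        ((lst.filter (fun x => PySem.Int.mod x 2 == 0)).flatMap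
          (fun e => (lst.filter (fun x => PySem.Int.mod x 2 != 0)).map (fun o => e * o)))
      = PySem.Set.ofList
          (((PySem.List.enumerate (lst.filter (fun x => PySem.Int.mod x 2 == 0)) 0).flatMap
            (fun p => ((lst.filter (fun x => PySem.Int.mod x 2 == 0)).drop (p.1 + 1).toNat).map (fun e2 => p.2 * e2)))
          ++ ((lst.filter (fun x => PySem.Int.mod x 2 == 0)).flatMap
            (fun e => (lst.filter (fun x => PySem.Int.mod x 2 != 0)).map (fun o => e * o)))) by
      rw [PySem.Set.ofList_eq_foldl, PySem.Set.ofList_eq_foldl, List.foldl_append]; rfl]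
  apply PySem.List.sorted_eq_sorted_of_perm _ _ _ (fun a b h => h)
  rw [List.perm_ext_iff_of_nodup (PySem.Set.nodup_ofList _) (PySem.Set.nodup_ofList _)]
  intro v
  rw [PySem.Set.mem_ofList, PySem.Set.mem_ofList, List.mem_filter, List.mem_append,
      mem_S_iff, mem_ee_iff, idxPair_iff_pairSub, idxPair_iff_pairSub]
  constructor
  · rintro ⟨hS, hev⟩
    have hv : (2:Int) ∣ v := by
      rw [← PySem.Int.mod_eq_zero_iff_dvd]; exact of_decide_eq_true hev
    rcases (parity_split lst v hv).mp hS with h | h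
    · exact Or.inl h
    · right
      obtain ⟨e, he, o, ho, heo⟩ := h
      rw [List.mem_flatMap]
      exact ⟨e, he, List.mem_map.mpr ⟨o, ho, heo⟩⟩
  · intro h
    have hv : (2:Int) ∣ v := by
      rcases h with h | h
      · exact pairSub_evens_dvd h
      · rw [List.mem_flatMap] at h
        obtain ⟨e, he, hv⟩ := h
        rw [List.mem_map] at hv
        obtain ⟨o, ho, heo⟩ := hv
        have := (evenB_iff e).mp (List.mem_filter.mp he).2
        exact heo ▸ this.mul_right o
    refine ⟨?_, decide_eq_true ((PySem.Int.mod_eq_zero_iff_dvd v 2).mpr hv)⟩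
    apply (parity_split lst v hv).mpr
    rcases h with h | h
    · exact Or.inl h
    · right
      rw [List.mem_flatMap] at h
      obtain ⟨e, he, hv'⟩ := h
      rw [List.mem_map] at hv'
      obtain ⟨o, ho, heo⟩ := hv'
      exact ⟨e, he, o, ho, heo⟩
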